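-- pv_equiv track=rewrite | github.com/agral/CompetitiveProgramming | AdventOfCode/2024/10/ans.py | walk_a
-- ===== SOURCE A (Python) =====
-- DIRS = [[1, 0], [0, 1], [-1, 0], [0, -1]]
--
-- def walk_a(hmap, H, W):
--     reachable_nines = [[set() for _ in row] for row in hmap]
--     for y in range(H):
--         for x in range(W):
--             if hmap[y][x] == 9:
--                 pos = (y, x)
--                 reachable_nines[y][x].add(pos)
--     for h in range(8, -1, -1): # from 8 to 0 with decrement -1
--         for y in range(H):
--             for x in range(W):
--                 for dir in DIRS:
--                     yy, xx = y + dir[0], x + dir[1]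
--                     if hmap[y][x] == h and yy >= 0 and yy < H and xx >= 0 and xx < W and hmap[yy][xx] == hmap[y][x] + 1:
--                         for n in reachable_nines[yy][xx]:
--                             reachable_nines[y][x].add(n)
--     ans = 0
--     for y in range(H):
--         for x in range(W):
--             if hmap[y][x] == 0:
--                 ans += len(reachable_nines[y][x])
--     return ans
-- ===== SOURCE B (Python) =====
-- DIRS = [[1, 0], [0, 1], [-1, 0], [0, -1]]
--
-- def walk_a(hmap, H, W):
--     def nines(y, x):
--         # set of 9-cells reachable from (y, x) by +1 height steps
--         if hmap[y][x] == 9: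
--             return {(y, x)}
--         acc = set()
--         for dy, dx in DIRS:
--             yy, xx = y + dy, x + dx
--             if 0 <= yy < H and 0 <= xx < W and hmap[yy][xx] == hmap[y][x] + 1:
--                 acc |= nines(yy, xx)
--         return acc
--     return sum(len(nines(y, x))
--                for y in range(H) for x in range(W) if hmap[y][x] == 0)
-- ===== Notes on version B (the rewrite author's own statement) =====
-- stated objective: simpler
-- what changed: Replaces the global height-decreasing set-propagation DP over a full grid of sets (9 extra full-grid passes) by a direct recursive DFS from each height-0 cell that collects the set of reachable 9-cells, summing the set sizes; only cells on actual trails are ever touched.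
import Mathlib
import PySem

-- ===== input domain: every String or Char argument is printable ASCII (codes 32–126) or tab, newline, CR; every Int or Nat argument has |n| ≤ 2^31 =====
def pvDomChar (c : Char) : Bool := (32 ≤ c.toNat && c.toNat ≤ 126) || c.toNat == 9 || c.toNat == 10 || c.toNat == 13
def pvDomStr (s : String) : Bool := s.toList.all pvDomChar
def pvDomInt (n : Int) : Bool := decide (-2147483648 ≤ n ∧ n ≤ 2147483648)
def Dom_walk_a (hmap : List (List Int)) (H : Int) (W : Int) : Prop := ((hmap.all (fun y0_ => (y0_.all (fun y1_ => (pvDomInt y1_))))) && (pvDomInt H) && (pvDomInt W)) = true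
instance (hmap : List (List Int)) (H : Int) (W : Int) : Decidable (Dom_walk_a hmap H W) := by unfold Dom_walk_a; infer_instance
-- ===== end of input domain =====

-- B replaces A's global height-decreasing set-propagation DP by a direct recursive DFS from each
-- trailhead collecting the set of reachable 9-cells (objective: simpler; return value only, no mutation).

-- hmap[y][x]: exact for every access both programs perform — all are range-guarded or inside Pre_.
def pvGet2 (hmap : List (List Int)) (y x : Int) : Int :=
  (PySem.List.pyGet? ((PySem.List.pyGet? hmap y).getD []) x).getD 0

def pvDirs : List (Int × Int) := [(1, 0), (0, 1), (-1, 0), (0, -1)]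

-- ===== PORT A =====
-- reachable_nines[y][x]
def pvSGet (g : List (List (List (Int × Int)))) (y x : Int) : List (Int × Int) :=
  (PySem.List.pyGet? ((PySem.List.pyGet? g y).getD []) x).getD []

-- reachable_nines[y][x] := f(reachable_nines[y][x])  (indices are nonnegative at every use)
def pvSMod (g : List (List (List (Int × Int)))) (y x : Int)
    (f : List (Int × Int) → List (Int × Int)) : List (List (List (Int × Int))) :=
  g.modify y.toNat (fun row => row.modify x.toNat f)

-- [[set() for _ in row] for row in hmap]
def pvInit0 (hmap : List (List Int)) : List (List (List (Int × Int))) :=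
  hmap.map (fun row => row.map (fun _ => ([] : List (Int × Int))))

-- body of the first double loop (seed the 9-cells)
def pvMark9 (hmap : List (List Int)) (rn : List (List (List (Int × Int)))) (y x : Int) :
    List (List (List (Int × Int))) :=
  if pvGet2 hmap y x = 9 then pvSMod rn y x (fun s => PySem.Set.add s (y, x)) else rn

-- body of the innermost (DIRS) loop of the propagation
def pvPull (hmap : List (List Int)) (H W h y x : Int)
    (rn : List (List (List (Int × Int)))) (d : Int × Int) : List (List (List (Int × Int))) :=
  let yy := y + d.1
  let xx := x + d.2
  if pvGet2 hmap y x = h ∧ 0 ≤ yy ∧ yy < H ∧ 0 ≤ xx ∧ xx < W ∧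
      pvGet2 hmap yy xx = pvGet2 hmap y x + 1 then
    (pvSGet rn yy xx).foldl (fun rn n => pvSMod rn y x (fun s => PySem.Set.add s n)) rn
  else rn

def walk_a (hmap : List (List Int)) (H : Int) (W : Int) : Int :=
  let rn0 := pvInit0 hmap
  let rn1 := (PySem.List.pyRange 0 H).foldl (fun rn y =>
      (PySem.List.pyRange 0 W).foldl (fun rn x => pvMark9 hmap rn y x) rn) rn0
  let rn2 := (PySem.List.pyRange 8 (-1) (-1)).foldl (fun rn h =>
      (PySem.List.pyRange 0 H).foldl (fun rn y =>
        (PySem.List.pyRange 0 W).foldl (fun rn x =>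
          pvDirs.foldl (fun rn d => pvPull hmap H W h y x rn d) rn) rn) rn) rn1
  (PySem.List.pyRange 0 H).foldl (fun ans y =>
    (PySem.List.pyRange 0 W).foldl (fun ans x =>
      if pvGet2 hmap y x = 0 then ans + (pvSGet rn2 y x).length else ans) ans) 0

-- ===== PORT B =====
-- nines(y, x) of Source B; the fuel only realises Python's call depth: calls start at height 0,
-- the height rises by exactly 1 per call and the recursion stops at height 9, so depth ≤ 10.
def pvNines (hmap : List (List Int)) (H W : Int) : Nat → Int → Int → List (Int × Int)
  | 0, _, _ => []
  | fuel + 1, y, x =>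
    if pvGet2 hmap y x = 9 then [(y, x)]
    else pvDirs.foldl (fun acc d =>
      let yy := y + d.1
      let xx := x + d.2
      if 0 ≤ yy ∧ yy < H ∧ 0 ≤ xx ∧ xx < W ∧ pvGet2 hmap yy xx = pvGet2 hmap y x + 1 then
        PySem.Set.update acc (pvNines hmap H W fuel yy xx)
      else acc) []

def walk_a_alt (hmap : List (List Int)) (H : Int) (W : Int) : Int :=
  (PySem.List.pyRange 0 H).foldl (fun ans y =>
    (PySem.List.pyRange 0 W).foldl (fun ans x =>
      if pvGet2 hmap y x = 0 then ans + (pvNines hmap H W 10 y x).length else ans) ans) 0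

-- ===== PRECONDITION & SPEC =====
-- Exactly the inputs where A returns: if 0 < W, A indexes hmap[y][x] for every y < H, x < W and
-- raises IndexError unless H ≤ len(hmap) and every one of the first H rows has length ≥ W
-- (if W ≤ 0 the inner loops are empty and A never indexes at all).
def Pre_walk_a (hmap : List (List Int)) (H : Int) (W : Int) : Prop :=
  0 < W → (H ≤ (hmap.length : Int) ∧ ∀ row ∈ hmap.take H.toNat, W ≤ (row.length : Int))
instance (hmap : List (List Int)) (H : Int) (W : Int) : Decidable (Pre_walk_a hmap H W) := by
  unfold Pre_walk_a; infer_instance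

def pvWitness_walk_a : List (List Int) × Int × Int := ([[0, 1], [9, 2]], 2, 2)

def Spec_walk_a (hmap : List (List Int)) (H : Int) (W : Int) (out : Int) : Prop := out = walk_a_alt hmap H W
instance (hmap : List (List Int)) (H : Int) (W : Int) (out : Int) : Decidable (Spec_walk_a hmap H W out) := by unfold Spec_walk_a; infer_instance

-- ===== CLAIM (what is proved, stated in full; the proofs are below) =====
def Claim_equal_walk_a : Prop := ∀ (hmap : List (List Int)) (H : Int) (W : Int), Dom_walk_a hmap H W → Pre_walk_a hmap H W → Spec_walk_a hmap H W (walk_a hmap H W)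

-- ===== LEMMAS AND PROOFS =====

def pvInb (H W y x : Int) : Prop := 0 ≤ y ∧ y < H ∧ 0 ≤ x ∧ x < W

-- (y,x) can reach the 9-cell (qy,qx) along orthogonal steps of height exactly +1
inductive pvReach (hmap : List (List Int)) (H W : Int) : Int → Int → Int → Int → Prop
  | refl (y x : Int) : pvGet2 hmap y x = 9 → pvReach hmap H W y x y x
  | step (y x qy qx : Int) (d : Int × Int) : d ∈ pvDirs →
      0 ≤ y + d.1 → y + d.1 < H → 0 ≤ x + d.2 → x + d.2 < W →
      pvGet2 hmap (y + d.1) (x + d.2) = pvGet2 hmap y x + 1 →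
      pvReach hmap H W (y + d.1) (x + d.2) qy qx → pvReach hmap H W y x qy qx

theorem pvReach_le (hmap : List (List Int)) (H W y x qy qx : Int)
    (h : pvReach hmap H W y x qy qx) : pvGet2 hmap y x ≤ 9 := by
  induction h with
  | refl y x h9 => omega
  | step y x qy qx d _ _ _ _ _ hstep _ ih => omega

theorem pvReach_nine (hmap : List (List Int)) (H W y x qy qx : Int)
    (h9 : pvGet2 hmap y x = 9) :
    pvReach hmap H W y x qy qx ↔ (qy = y ∧ qx = x) := by
  constructor
  · intro h
    cases h with
    | refl => exact ⟨rfl, rfl⟩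
    | step _ _ _ _ d hd h1 h2 h3 h4 hstep hr =>
      have := pvReach_le hmap H W _ _ _ _ hr; omega
  · rintro ⟨h1, h2⟩; subst h1; subst h2; exact pvReach.refl _ _ h9

theorem pvReach_succ (hmap : List (List Int)) (H W y x qy qx : Int)
    (h9 : pvGet2 hmap y x ≠ 9) :
    pvReach hmap H W y x qy qx ↔
      ∃ d ∈ pvDirs, 0 ≤ y + d.1 ∧ y + d.1 < H ∧ 0 ≤ x + d.2 ∧ x + d.2 < W ∧
        pvGet2 hmap (y + d.1) (x + d.2) = pvGet2 hmap y x + 1 ∧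
        pvReach hmap H W (y + d.1) (x + d.2) qy qx := by
  constructor
  · intro h
    cases h with
    | refl => exact absurd (by assumption) h9
    | step _ _ _ _ d hd h1 h2 h3 h4 hstep hr => exact ⟨d, hd, h1, h2, h3, h4, hstep, hr⟩
  · rintro ⟨d, hd, h1, h2, h3, h4, hstep, hr⟩
    exact pvReach.step y x qy qx d hd h1 h2 h3 h4 hstep hr

-- generic: membership and nodup of a guarded-update fold (shape of pvNines' inner loop)
theorem pvFoldUpdate {α : Type} (L : List α) (C : α → Prop) [DecidablePred C]
    (g : α → List (Int × Int)) :
    ∀ acc : List (Int × Int), acc.Nodup →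
      ((L.foldl (fun acc d => if C d then PySem.Set.update acc (g d) else acc) acc).Nodup ∧
       ∀ q, q ∈ L.foldl (fun acc d => if C d then PySem.Set.update acc (g d) else acc) acc ↔
         q ∈ acc ∨ ∃ d ∈ L, C d ∧ q ∈ g d) := by
  induction L with
  | nil => intro acc hnd; simp [hnd]
  | cons d L ih =>
    intro acc hnd
    by_cases hc : C d
    · have h1 : (PySem.Set.update acc (g d)).Nodup := PySem.Set.nodup_update acc (g d) hnd
      obtain ⟨hnd', hmem⟩ := ih (PySem.Set.update acc (g d)) h1
      refine ⟨by simpa [hc] using hnd', ?_⟩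
      intro q
      simp only [List.foldl_cons, if_pos hc]
      rw [hmem q, PySem.Set.mem_update]
      constructor
      · rintro ((h | h) | h)
        · exact Or.inl h
        · exact Or.inr ⟨d, by simp, hc, h⟩
        · obtain ⟨d', hd', hc', hg'⟩ := h; exact Or.inr ⟨d', by simp [hd'], hc', hg'⟩
      · rintro (h | ⟨d', hd', hc', hg'⟩)
        · exact Or.inl (Or.inl h)
        · rcases List.mem_cons.mp hd' with rfl | hd''
          · exact Or.inl (Or.inr hg')
          · exact Or.inr ⟨d', hd'', hc', hg'⟩
    · obtain ⟨hnd', hmem⟩ := ih acc hnd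
      refine ⟨by simpa [hc] using hnd', ?_⟩
      intro q
      simp only [List.foldl_cons, if_neg hc]
      rw [hmem q]
      constructor
      · rintro (h | ⟨d', hd', hc', hg'⟩)
        · exact Or.inl h
        · exact Or.inr ⟨d', by simp [hd'], hc', hg'⟩
      · rintro (h | ⟨d', hd', hc', hg'⟩)
        · exact Or.inl h
        · rcases List.mem_cons.mp hd' with rfl | hd''
          · exact absurd hc' hc
          · exact Or.inr ⟨d', hd'', hc', hg'⟩

-- B's DFS computes exactly the reachable 9-cells, without duplicates
theorem pvNines_correct (hmap : List (List Int)) (H W : Int) :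
    ∀ (fuel : Nat) (y x : Int), pvInb H W y x →
      0 ≤ pvGet2 hmap y x → pvGet2 hmap y x ≤ 9 → 10 - pvGet2 hmap y x ≤ (fuel : Int) →
      ((pvNines hmap H W fuel y x).Nodup ∧
       ∀ q : Int × Int, q ∈ pvNines hmap H W fuel y x ↔ pvReach hmap H W y x q.1 q.2) := by
  intro fuel
  induction fuel with
  | zero =>
    intro y x hinb h0 h9 hfuel
    exfalso
    simp only [Nat.cast_zero] at hfuel
    omega
  | succ fuel ih =>
    intro y x hinb h0 h9 hfuel
    by_cases hn : pvGet2 hmap y x = 9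
    · refine ⟨by simp [pvNines, hn], ?_⟩
      intro q
      simp [pvNines, hn, pvReach_nine hmap H W y x q.1 q.2 hn, Prod.ext_iff]
    · obtain ⟨hnd, hmem⟩ := pvFoldUpdate pvDirs
        (fun d => 0 ≤ y + d.1 ∧ y + d.1 < H ∧ 0 ≤ x + d.2 ∧ x + d.2 < W ∧
          pvGet2 hmap (y + d.1) (x + d.2) = pvGet2 hmap y x + 1)
        (fun d => pvNines hmap H W fuel (y + d.1) (x + d.2)) [] List.nodup_nil
      constructor
      · simpa [pvNines, hn] using hnd
      · intro q
        have hq : q ∈ pvNines hmap H W (fuel + 1) y x ↔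
            q ∈ ([] : List (Int × Int)) ∨ ∃ d ∈ pvDirs,
              (0 ≤ y + d.1 ∧ y + d.1 < H ∧ 0 ≤ x + d.2 ∧ x + d.2 < W ∧
                pvGet2 hmap (y + d.1) (x + d.2) = pvGet2 hmap y x + 1) ∧
              q ∈ pvNines hmap H W fuel (y + d.1) (x + d.2) := by
          simpa [pvNines, hn] using hmem q
        rw [hq, pvReach_succ hmap H W y x q.1 q.2 hn]
        constructor
        · rintro (h | ⟨d, hd, ⟨c1, c2, c3, c4, c5⟩, hm⟩)
          · simp at h
          · refine ⟨d, hd, c1, c2, c3, c4, c5, ?_⟩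
            have := (ih (y + d.1) (x + d.2) ⟨c1, c2, c3, c4⟩ (by omega) (by omega)
              (by push_cast at hfuel ⊢; omega)).2 q
            exact this.mp hm
        · rintro ⟨d, hd, c1, c2, c3, c4, c5, hr⟩
          refine Or.inr ⟨d, hd, ⟨c1, c2, c3, c4, c5⟩, ?_⟩
          have := (ih (y + d.1) (x + d.2) ⟨c1, c2, c3, c4⟩ (by omega) (by omega)
            (by push_cast at hfuel ⊢; omega)).2 q
          exact this.mpr hr

-- ---- A-side machinery ----

def pvSh (hmap : List (List Int)) (g : List (List (List (Int × Int)))) : Prop :=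
  g.map List.length = hmap.map List.length

theorem pvSh_len (hmap : List (List Int)) (g : List (List (List (Int × Int))))
    (h : pvSh hmap g) : g.length = hmap.length := by
  have := congrArg List.length h; simpa using this

theorem pvSh_row (hmap : List (List Int)) (g : List (List (List (Int × Int))))
    (h : pvSh hmap g) (i : Nat) :
    (g.getD i []).length = ((hmap.getD i []).length) := by
  have hlen := pvSh_len hmap g h
  rcases Nat.lt_or_ge i g.length with hi | hi
  · have hi' : i < hmap.length := hlen ▸ hi
    have h2 : (g.map List.length)[i]? = (hmap.map List.length)[i]? := by rw [h]
    rw [List.getElem?_map, List.getElem?_map, List.getElem?_eq_getElem hi,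
      List.getElem?_eq_getElem hi'] at h2
    simp only [Option.map_eq_map, Option.map_some, Option.some.injEq] at h2
    simp [List.getD_eq_getElem?_getD, List.getElem?_eq_getElem hi,
      List.getElem?_eq_getElem hi', h2]
  · have hi' : hmap.length ≤ i := hlen ▸ hi
    simp [List.getD_eq_getElem?_getD, List.getElem?_eq_none hi, List.getElem?_eq_none hi']

-- pvSGet via getD (nonnegative indices)
theorem pvSGet_eq (g : List (List (List (Int × Int)))) (y x : Int) (hy : 0 ≤ y) (hx : 0 ≤ x) :
    pvSGet g y x = (g.getD y.toNat []).getD x.toNat [] := by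
  simp [pvSGet, PySem.List.pyGet?_of_nonneg _ hy, PySem.List.pyGet?_of_nonneg _ hx,
    List.getD_eq_getElem?_getD]

-- read-after-modify on the grid
theorem pvSGet_pvSMod (g : List (List (List (Int × Int)))) (y x y' x' : Int)
    (f : List (Int × Int) → List (Int × Int))
    (hy : 0 ≤ y) (hx : 0 ≤ x) (hy' : 0 ≤ y') (hx' : 0 ≤ x')
    (hylen : y.toNat < g.length) (hxlen : x.toNat < (g.getD y.toNat []).length) :
    pvSGet (pvSMod g y x f) y' x' =
      if y' = y ∧ x' = x then f (pvSGet g y x) else pvSGet g y' x' := by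
  rw [pvSGet_eq (pvSMod g y x f) y' x' hy' hx', pvSGet_eq g y x hy hx, pvSGet_eq g y' x' hy' hx']
  unfold pvSMod
  have hrow : g[y.toNat]? = some g[y.toNat] := List.getElem?_eq_getElem hylen
  have hrl : x.toNat < g[y.toNat].length := by
    simpa [List.getD_eq_getElem?_getD, hrow] using hxlen
  by_cases h1 : y' = y
  · subst h1
    by_cases h2 : x' = x
    · subst h2
      simp [List.getD_eq_getElem?_getD, List.getElem?_modify, hrow,
        List.getElem?_eq_getElem hrl]
    · have hm : x.toNat ≠ x'.toNat := by omega
      rw [if_neg (by simp [h2])]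
      simp only [List.getD_eq_getElem?_getD, List.getElem?_modify, hrow]
      simp [List.getElem?_modify, hm]
  · have hn : y.toNat ≠ y'.toNat := by omega
    rw [if_neg (by tauto)]
    simp only [List.getD_eq_getElem?_getD, List.getElem?_modify, hn, if_false]
    cases g[y'.toNat]? <;> simp

theorem pvSh_pvSMod (hmap : List (List Int)) (g : List (List (List (Int × Int))))
    (y x : Int) (f : List (Int × Int) → List (Int × Int)) (h : pvSh hmap g) :
    pvSh hmap (pvSMod g y x f) := by
  unfold pvSh pvSMod
  rw [← h]
  apply List.ext_getElem?
  intro i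
  rw [List.getElem?_map, List.getElem?_map, List.getElem?_modify]
  cases g[i]? with
  | none => rfl
  | some row =>
    simp only [Option.map_eq_map, Option.map_some, Option.some.injEq]
    split <;> simp [List.length_modify]

-- in-range facts for an in-bounds cell, from Pre_
theorem pvRowLen (hmap : List (List Int)) (H W y x : Int)
    (hpre : Pre_walk_a hmap H W) (hinb : pvInb H W y x) :
    y.toNat < hmap.length ∧ x.toNat < (hmap.getD y.toNat []).length := by
  obtain ⟨hy0, hyH, hx0, hxW⟩ := hinb
  obtain ⟨hH, hrows⟩ := hpre (by omega)
  have h1 : y.toNat < hmap.length := by omega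
  refine ⟨h1, ?_⟩
  have hmem : hmap.getD y.toNat [] ∈ hmap.take H.toNat := by
    have hg : (hmap.take H.toNat)[y.toNat]? = some hmap[y.toNat] := by
      rw [List.getElem?_take, if_pos (by omega), List.getElem?_eq_getElem h1]
    have : hmap.getD y.toNat [] = hmap[y.toNat] := by
      simp [List.getD_eq_getElem?_getD, List.getElem?_eq_getElem h1]
    rw [this]
    exact List.mem_of_getElem? hg
  have := hrows _ hmem
  omega

theorem pvSModId (g : List (List (List (Int × Int)))) (y x : Int) :
    pvSMod g y x (fun s => s) = g := by
  unfold pvSMod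
  apply List.ext_getElem?
  intro i
  rw [List.getElem?_modify]
  cases g[i]? with
  | none => rfl
  | some row =>
    simp only [Option.map_eq_map, Option.map_some, Option.some.injEq]
    split
    · apply List.ext_getElem?
      intro j
      rw [List.getElem?_modify]
      cases row[j]? with
      | none => rfl
      | some v =>
        simp only [Option.map_eq_map, Option.map_some, Option.some.injEq]
        split <;> rfl
    · rfl

theorem pvModMod (g : List (List (List (Int × Int)))) (y x : Int)
    (f1 f2 : List (Int × Int) → List (Int × Int)) :
    pvSMod (pvSMod g y x f1) y x f2 = pvSMod g y x (fun s => f2 (f1 s)) := by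
  unfold pvSMod
  apply List.ext_getElem?
  intro i
  rw [List.getElem?_modify, List.getElem?_modify, List.getElem?_modify]
  cases g[i]? with
  | none => rfl
  | some row =>
    simp only [Option.map_eq_map, Option.map_some, Option.some.injEq]
    by_cases hi : y.toNat = i
    · simp only [if_pos hi]
      apply List.ext_getElem?
      intro j
      rw [List.getElem?_modify, List.getElem?_modify, List.getElem?_modify]
      cases row[j]? with
      | none => rfl
      | some v =>
        simp only [Option.map_eq_map, Option.map_some, Option.some.injEq]
        by_cases hj : x.toNat = j <;> simp [hj]
    · simp [hi]

-- the inner "for n in S: add" fold is a single modify with Set.update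
theorem pvAddFold (y x : Int) :
    ∀ (L : List (Int × Int)) (g : List (List (List (Int × Int)))),
      L.foldl (fun g n => pvSMod g y x (fun s => PySem.Set.add s n)) g =
        pvSMod g y x (fun s => PySem.Set.update s L) := by
  intro L
  induction L with
  | nil =>
    intro g
    simp only [List.foldl_nil, PySem.Set.update_nil]
    exact (pvSModId g y x).symm
  | cons n L ih =>
    intro g
    simp only [List.foldl_cons]
    rw [ih, pvModMod]
    simp only [PySem.Set.update_cons]

-- union over valid neighbours, read in grid gR
def pvU (hmap : List (List Int)) (H W h y x : Int) (gR : List (List (List (Int × Int))))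
    (q : Int × Int) : Prop :=
  pvGet2 hmap y x = h ∧ ∃ d ∈ pvDirs, 0 ≤ y + d.1 ∧ y + d.1 < H ∧ 0 ≤ x + d.2 ∧ x + d.2 < W ∧
    pvGet2 hmap (y + d.1) (x + d.2) = pvGet2 hmap y x + 1 ∧
    q ∈ pvSGet gR (y + d.1) (x + d.2)

-- grid g agrees with gR on every cell whose height is not h
def pvAgr (hmap : List (List Int)) (h : Int)
    (g gR : List (List (List (Int × Int)))) : Prop :=
  ∀ y x : Int, 0 ≤ y → 0 ≤ x → pvGet2 hmap y x ≠ h → pvSGet g y x = pvSGet gR y x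

theorem pvPull_pos (hmap : List (List Int)) (H W h y x : Int)
    (g : List (List (List (Int × Int)))) (d : Int × Int)
    (hc : pvGet2 hmap y x = h ∧ 0 ≤ y + d.1 ∧ y + d.1 < H ∧ 0 ≤ x + d.2 ∧ x + d.2 < W ∧
      pvGet2 hmap (y + d.1) (x + d.2) = pvGet2 hmap y x + 1) :
    pvPull hmap H W h y x g d =
      pvSMod g y x (fun s => PySem.Set.update s (pvSGet g (y + d.1) (x + d.2))) := by
  simp only [pvPull]
  rw [if_pos hc]
  exact pvAddFold y x _ g

theorem pvPull_neg (hmap : List (List Int)) (H W h y x : Int)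
    (g : List (List (List (Int × Int)))) (d : Int × Int)
    (hc : ¬(pvGet2 hmap y x = h ∧ 0 ≤ y + d.1 ∧ y + d.1 < H ∧ 0 ≤ x + d.2 ∧ x + d.2 < W ∧
      pvGet2 hmap (y + d.1) (x + d.2) = pvGet2 hmap y x + 1)) :
    pvPull hmap H W h y x g d = g := by
  simp only [pvPull]
  rw [if_neg hc]

theorem pvCellAux (hmap : List (List Int)) (H W h y x : Int)
    (gR : List (List (List (Int × Int))))
    (hpre : Pre_walk_a hmap H W) (hinb : pvInb H W y x) :
    ∀ (D : List (Int × Int)), (∀ d ∈ D, ¬(d.1 = 0 ∧ d.2 = 0)) →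
    ∀ g, pvSh hmap g → pvAgr hmap h g gR →
      pvSh hmap (D.foldl (fun g d => pvPull hmap H W h y x g d) g) ∧
      pvAgr hmap h (D.foldl (fun g d => pvPull hmap H W h y x g d) g) gR ∧
      (∀ y' x' : Int, 0 ≤ y' → 0 ≤ x' → ¬(y' = y ∧ x' = x) →
        pvSGet (D.foldl (fun g d => pvPull hmap H W h y x g d) g) y' x' = pvSGet g y' x') ∧
      (∀ q, q ∈ pvSGet (D.foldl (fun g d => pvPull hmap H W h y x g d) g) y x ↔
        q ∈ pvSGet g y x ∨ ∃ d ∈ D,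
          (pvGet2 hmap y x = h ∧ 0 ≤ y + d.1 ∧ y + d.1 < H ∧ 0 ≤ x + d.2 ∧ x + d.2 < W ∧
            pvGet2 hmap (y + d.1) (x + d.2) = pvGet2 hmap y x + 1) ∧
          q ∈ pvSGet gR (y + d.1) (x + d.2)) ∧
      ((pvSGet g y x).Nodup →
        (pvSGet (D.foldl (fun g d => pvPull hmap H W h y x g d) g) y x).Nodup) := by
  intro D
  induction D with
  | nil =>
    intro _ g hsh hagr
    exact ⟨hsh, hagr, fun _ _ _ _ _ => rfl, fun q => by simp, fun hnd => hnd⟩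
  | cons d D ihD =>
    intro hD g hsh hagr
    have hd0 : ¬(d.1 = 0 ∧ d.2 = 0) := hD d (by simp)
    have hrest : ∀ d ∈ D, ¬(d.1 = 0 ∧ d.2 = 0) := fun d' hd' => hD d' (by simp [hd'])
    have hyg : y.toNat < g.length := by
      rw [pvSh_len hmap g hsh]; exact (pvRowLen hmap H W y x hpre hinb).1
    have hxg : x.toNat < (g.getD y.toNat []).length := by
      rw [pvSh_row hmap g hsh y.toNat]; exact (pvRowLen hmap H W y x hpre hinb).2
    obtain ⟨hy0, hyH, hx0, hxW⟩ := hinb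
    by_cases hc : pvGet2 hmap y x = h ∧ 0 ≤ y + d.1 ∧ y + d.1 < H ∧ 0 ≤ x + d.2 ∧
        x + d.2 < W ∧ pvGet2 hmap (y + d.1) (x + d.2) = pvGet2 hmap y x + 1
    · have hg1 := pvPull_pos hmap H W h y x g d hc
      simp only [List.foldl_cons, hg1]
      obtain ⟨hc1, hc2, hc3, hc4, hc5, hc6⟩ := hc
      have hGet : ∀ y' x' : Int, 0 ≤ y' → 0 ≤ x' →
          pvSGet (pvSMod g y x (fun s => PySem.Set.update s (pvSGet g (y + d.1) (x + d.2)))) y' x' =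
          if y' = y ∧ x' = x then
            PySem.Set.update (pvSGet g y x) (pvSGet g (y + d.1) (x + d.2))
          else pvSGet g y' x' := by
        intro y' x' h1 h2
        exact pvSGet_pvSMod g y x y' x' _ hy0 hx0 h1 h2 hyg hxg
      have hS1 : pvSh hmap (pvSMod g y x
          (fun s => PySem.Set.update s (pvSGet g (y + d.1) (x + d.2)))) :=
        pvSh_pvSMod hmap g y x _ hsh
      have hA1 : pvAgr hmap h (pvSMod g y x
          (fun s => PySem.Set.update s (pvSGet g (y + d.1) (x + d.2)))) gR := by
        intro y' x' h1 h2 hne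
        rw [hGet y' x' h1 h2]
        by_cases he : y' = y ∧ x' = x
        · exact absurd (he.1 ▸ he.2 ▸ hc1) hne
        · rw [if_neg he]; exact hagr y' x' h1 h2 hne
      obtain ⟨S2, A2, O2, M2, N2⟩ := ihD hrest _ hS1 hA1
      have hnbR : pvSGet g (y + d.1) (x + d.2) = pvSGet gR (y + d.1) (x + d.2) :=
        hagr (y + d.1) (x + d.2) hc2 hc4 (by omega)
      have hyx : pvSGet (pvSMod g y x
          (fun s => PySem.Set.update s (pvSGet g (y + d.1) (x + d.2)))) y x =
          PySem.Set.update (pvSGet g y x) (pvSGet g (y + d.1) (x + d.2)) := by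
        rw [hGet y x hy0 hx0, if_pos ⟨rfl, rfl⟩]
      refine ⟨S2, A2, ?_, ?_, ?_⟩
      · intro y' x' h1 h2 hne
        rw [O2 y' x' h1 h2 hne, hGet y' x' h1 h2, if_neg hne]
      · intro q
        rw [M2 q, hyx, PySem.Set.mem_update, hnbR]
        constructor
        · rintro ((hm | hm) | ⟨d', hd', hc', hm'⟩)
          · exact Or.inl hm
          · exact Or.inr ⟨d, by simp, ⟨hc1, hc2, hc3, hc4, hc5, hc6⟩, hm⟩
          · exact Or.inr ⟨d', by simp [hd'], hc', hm'⟩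
        · rintro (hm | ⟨d', hd', hc', hm'⟩)
          · exact Or.inl (Or.inl hm)
          · rcases List.mem_cons.mp hd' with rfl | hd''
            · exact Or.inl (Or.inr hm')
            · exact Or.inr ⟨d', hd'', hc', hm'⟩
      · intro hnd
        apply N2
        rw [hyx]
        exact PySem.Set.nodup_update _ _ hnd
    · have hg1 := pvPull_neg hmap H W h y x g d hc
      simp only [List.foldl_cons, hg1]
      obtain ⟨S2, A2, O2, M2, N2⟩ := ihD hrest g hsh hagr
      refine ⟨S2, A2, O2, ?_, N2⟩
      intro q
      rw [M2 q]
      constructor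
      · rintro (hm | ⟨d', hd', hc', hm'⟩)
        · exact Or.inl hm
        · exact Or.inr ⟨d', by simp [hd'], hc', hm'⟩
      · rintro (hm | ⟨d', hd', hc', hm'⟩)
        · exact Or.inl hm
        · rcases List.mem_cons.mp hd' with rfl | hd''
          · exact absurd hc' hc
          · exact Or.inr ⟨d', hd'', hc', hm'⟩

-- one cell's DIRS fold
theorem pvCellChar (hmap : List (List Int)) (H W h y x : Int)
    (g gR : List (List (List (Int × Int))))
    (hpre : Pre_walk_a hmap H W) (hsh : pvSh hmap g) (hinb : pvInb H W y x)
    (hagr : pvAgr hmap h g gR) :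
    pvSh hmap (pvDirs.foldl (fun g d => pvPull hmap H W h y x g d) g) ∧
    pvAgr hmap h (pvDirs.foldl (fun g d => pvPull hmap H W h y x g d) g) gR ∧
    (∀ y' x' : Int, 0 ≤ y' → 0 ≤ x' → ¬(y' = y ∧ x' = x) →
      pvSGet (pvDirs.foldl (fun g d => pvPull hmap H W h y x g d) g) y' x' = pvSGet g y' x') ∧
    (∀ q, q ∈ pvSGet (pvDirs.foldl (fun g d => pvPull hmap H W h y x g d) g) y x ↔
      q ∈ pvSGet g y x ∨ pvU hmap H W h y x gR q) ∧
    ((pvSGet g y x).Nodup →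
      (pvSGet (pvDirs.foldl (fun g d => pvPull hmap H W h y x g d) g) y x).Nodup) := by
  obtain ⟨S2, A2, O2, M2, N2⟩ := pvCellAux hmap H W h y x gR hpre hinb pvDirs (by decide)
    g hsh hagr
  refine ⟨S2, A2, O2, ?_, N2⟩
  intro q
  rw [M2 q]
  constructor
  · rintro (hm | ⟨d', hd', ⟨hh, hc'⟩, hm'⟩)
    · exact Or.inl hm
    · exact Or.inr ⟨hh, d', hd', hc'.1, hc'.2.1, hc'.2.2.1, hc'.2.2.2.1, hc'.2.2.2.2, hm'⟩
  · rintro (hm | ⟨hh, d', hd', c1, c2, c3, c4, c5, hm'⟩)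
    · exact Or.inl hm
    · exact Or.inr ⟨d', hd', ⟨hh, c1, c2, c3, c4, c5⟩, hm'⟩

-- the x-loop of one propagation row
theorem pvRowChar (hmap : List (List Int)) (H W h y : Int)
    (hpre : Pre_walk_a hmap H W) (hy0 : 0 ≤ y) (hyH : y < H) :
    ∀ (n : Nat) (a : Int), 0 ≤ a → (W - a).toNat = n →
      ∀ (g gR : List (List (List (Int × Int)))), pvSh hmap g → pvAgr hmap h g gR →
      pvSh hmap ((PySem.List.pyRange a W).foldl (fun g x =>
          pvDirs.foldl (fun g d => pvPull hmap H W h y x g d) g) g) ∧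
      pvAgr hmap h ((PySem.List.pyRange a W).foldl (fun g x =>
          pvDirs.foldl (fun g d => pvPull hmap H W h y x g d) g) g) gR ∧
      (∀ y' x' : Int, 0 ≤ y' → 0 ≤ x' → ¬(y' = y ∧ a ≤ x' ∧ x' < W) →
        pvSGet ((PySem.List.pyRange a W).foldl (fun g x =>
          pvDirs.foldl (fun g d => pvPull hmap H W h y x g d) g) g) y' x' = pvSGet g y' x') ∧
      (∀ x' : Int, a ≤ x' → x' < W →
        (∀ q, q ∈ pvSGet ((PySem.List.pyRange a W).foldl (fun g x =>
            pvDirs.foldl (fun g d => pvPull hmap H W h y x g d) g) g) y x' ↔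
          q ∈ pvSGet g y x' ∨ pvU hmap H W h y x' gR q) ∧
        ((pvSGet g y x').Nodup →
          (pvSGet ((PySem.List.pyRange a W).foldl (fun g x =>
            pvDirs.foldl (fun g d => pvPull hmap H W h y x g d) g) g) y x').Nodup)) := by
  intro n
  induction n with
  | zero =>
    intro a ha0 han g gR hsh hagr
    have hWa : W ≤ a := by omega
    rw [PySem.List.pyRange_one_eq_nil hWa]
    exact ⟨hsh, hagr, fun _ _ _ _ _ => rfl, fun x' h1 h2 => absurd (by omega : W ≤ W) (by omega)⟩
  | succ n ihn =>
    intro a ha0 han g gR hsh hagr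
    have haW : a < W := by omega
    rw [PySem.List.pyRange_one_cons haW]
    simp only [List.foldl_cons]
    have hinb : pvInb H W y a := ⟨hy0, hyH, ha0, haW⟩
    obtain ⟨cS, cA, cO, cM, cN⟩ := pvCellChar hmap H W h y a g gR hpre hsh hinb hagr
    obtain ⟨S2, A2, O2, P2⟩ := ihn (a + 1) (by omega) (by omega) _ gR cS cA
    refine ⟨S2, A2, ?_, ?_⟩
    · intro y' x' h1 h2 hne
      rw [O2 y' x' h1 h2 (by rintro ⟨rfl, hh1, hh2⟩; exact hne ⟨rfl, by omega, hh2⟩)]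
      exact cO y' x' h1 h2 (by rintro ⟨rfl, rfl⟩; exact hne ⟨rfl, by omega, haW⟩)
    · intro x' hax' hx'W
      rcases eq_or_lt_of_le hax' with heq | hlt
      · subst heq
        have hunch : pvSGet ((PySem.List.pyRange (a + 1) W).foldl (fun g x =>
            pvDirs.foldl (fun g d => pvPull hmap H W h y x g d) g)
            (pvDirs.foldl (fun g d => pvPull hmap H W h y a g d) g)) y a =
            pvSGet (pvDirs.foldl (fun g d => pvPull hmap H W h y a g d) g) y a :=
          O2 y a hy0 (by omega) (by rintro ⟨-, hh1, -⟩; omega)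
        refine ⟨?_, ?_⟩
        · intro q; rw [hunch]; exact cM q
        · intro hnd; rw [hunch]; exact cN hnd
      · have hcell : pvSGet (pvDirs.foldl (fun g d => pvPull hmap H W h y a g d) g) y x' =
            pvSGet g y x' := cO y x' hy0 (by omega) (by rintro ⟨-, rfl⟩; omega)
        obtain ⟨hm2, hn2⟩ := P2 x' (by omega) hx'W
        refine ⟨?_, ?_⟩
        · intro q; rw [hm2 q, hcell]
        · intro hnd; exact hn2 (hcell ▸ hnd)

-- the y-loop of one propagation round
theorem pvColChar (hmap : List (List Int)) (H W h : Int)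
    (hpre : Pre_walk_a hmap H W) :
    ∀ (n : Nat) (a : Int), 0 ≤ a → (H - a).toNat = n →
      ∀ (g gR : List (List (List (Int × Int)))), pvSh hmap g → pvAgr hmap h g gR →
      pvSh hmap ((PySem.List.pyRange a H).foldl (fun g y =>
          (PySem.List.pyRange 0 W).foldl (fun g x =>
            pvDirs.foldl (fun g d => pvPull hmap H W h y x g d) g) g) g) ∧
      pvAgr hmap h ((PySem.List.pyRange a H).foldl (fun g y =>
          (PySem.List.pyRange 0 W).foldl (fun g x =>
            pvDirs.foldl (fun g d => pvPull hmap H W h y x g d) g) g) g) gR ∧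
      (∀ y' x' : Int, 0 ≤ y' → 0 ≤ x' → ¬(a ≤ y' ∧ y' < H ∧ 0 ≤ x' ∧ x' < W) →
        pvSGet ((PySem.List.pyRange a H).foldl (fun g y =>
          (PySem.List.pyRange 0 W).foldl (fun g x =>
            pvDirs.foldl (fun g d => pvPull hmap H W h y x g d) g) g) g) y' x' = pvSGet g y' x') ∧
      (∀ y' x' : Int, a ≤ y' → y' < H → 0 ≤ x' → x' < W →
        (∀ q, q ∈ pvSGet ((PySem.List.pyRange a H).foldl (fun g y =>
            (PySem.List.pyRange 0 W).foldl (fun g x =>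
              pvDirs.foldl (fun g d => pvPull hmap H W h y x g d) g) g) g) y' x' ↔
          q ∈ pvSGet g y' x' ∨ pvU hmap H W h y' x' gR q) ∧
        ((pvSGet g y' x').Nodup →
          (pvSGet ((PySem.List.pyRange a H).foldl (fun g y =>
            (PySem.List.pyRange 0 W).foldl (fun g x =>
              pvDirs.foldl (fun g d => pvPull hmap H W h y x g d) g) g) g) y' x').Nodup)) := by
  intro n
  induction n with
  | zero =>
    intro a ha0 han g gR hsh hagr
    have hHa : H ≤ a := by omega
    rw [PySem.List.pyRange_one_eq_nil hHa]
    exact ⟨hsh, hagr, fun _ _ _ _ _ => rfl,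
      fun y' x' h1 h2 _ _ => absurd (by omega : y' < a) (by omega)⟩
  | succ n ihn =>
    intro a ha0 han g gR hsh hagr
    have haH : a < H := by omega
    rw [PySem.List.pyRange_one_cons haH]
    simp only [List.foldl_cons]
    obtain ⟨rS, rA, rO, rP⟩ := pvRowChar hmap H W h a hpre ha0 haH W.toNat 0 (by omega)
      (by omega) g gR hsh hagr
    obtain ⟨S2, A2, O2, P2⟩ := ihn (a + 1) (by omega) (by omega) _ gR rS rA
    refine ⟨S2, A2, ?_, ?_⟩
    · intro y' x' h1 h2 hne
      rw [O2 y' x' h1 h2 (by rintro ⟨hh1, hh2, hh3, hh4⟩; exact hne ⟨by omega, hh2, hh3, hh4⟩)]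
      exact rO y' x' h1 h2 (by rintro ⟨rfl, hh3, hh4⟩; exact hne ⟨by omega, haH, hh3, hh4⟩)
    · intro y' x' hay' hy'H hx0 hxW
      rcases eq_or_lt_of_le hay' with heq | hlt
      · subst heq
        have hunch : pvSGet ((PySem.List.pyRange (a + 1) H).foldl (fun g y =>
            (PySem.List.pyRange 0 W).foldl (fun g x =>
              pvDirs.foldl (fun g d => pvPull hmap H W h y x g d) g) g)
            ((PySem.List.pyRange 0 W).foldl (fun g x =>
              pvDirs.foldl (fun g d => pvPull hmap H W h a x g d) g) g)) a x' =
            pvSGet ((PySem.List.pyRange 0 W).foldl (fun g x =>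
              pvDirs.foldl (fun g d => pvPull hmap H W h a x g d) g) g) a x' :=
          O2 a x' ha0 hx0 (by rintro ⟨hh1, -⟩; omega)
        obtain ⟨hm2, hn2⟩ := rP x' hx0 hxW
        refine ⟨?_, ?_⟩
        · intro q; rw [hunch]; exact hm2 q
        · intro hnd; rw [hunch]; exact hn2 hnd
      · have hrow : pvSGet ((PySem.List.pyRange 0 W).foldl (fun g x =>
            pvDirs.foldl (fun g d => pvPull hmap H W h a x g d) g) g) y' x' =
            pvSGet g y' x' := rO y' x' (by omega) hx0 (by rintro ⟨rfl, -⟩; omega)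
        obtain ⟨hm2, hn2⟩ := P2 y' x' (by omega) hy'H hx0 hxW
        refine ⟨?_, ?_⟩
        · intro q; rw [hm2 q, hrow]
        · intro hnd; exact hn2 (hrow ▸ hnd)

-- the invariant after the rounds 8 … h have been performed
def pvQ (hmap : List (List Int)) (H W h : Int) (g : List (List (List (Int × Int)))) : Prop :=
  pvSh hmap g ∧ ∀ y x : Int, pvInb H W y x →
    ((h ≤ pvGet2 hmap y x ∧ pvGet2 hmap y x ≤ 9 →
        (pvSGet g y x).Nodup ∧
        ∀ q : Int × Int, q ∈ pvSGet g y x ↔ pvReach hmap H W y x q.1 q.2) ∧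
     ((pvGet2 hmap y x < h ∨ 9 < pvGet2 hmap y x) → pvSGet g y x = []))

theorem pvQStep (hmap : List (List Int)) (H W h : Int)
    (hpre : Pre_walk_a hmap H W) (h0 : 0 ≤ h) (h8 : h ≤ 8)
    (g : List (List (List (Int × Int)))) (hq : pvQ hmap H W (h + 1) g) :
    pvQ hmap H W h ((PySem.List.pyRange 0 H).foldl (fun g y =>
      (PySem.List.pyRange 0 W).foldl (fun g x =>
        pvDirs.foldl (fun g d => pvPull hmap H W h y x g d) g) g) g) := by
  obtain ⟨hsh, hcell⟩ := hq
  have hrefl : pvAgr hmap h g g := fun _ _ _ _ _ => rfl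
  obtain ⟨S2, A2, O2, P2⟩ := pvColChar hmap H W h hpre H.toNat 0 (by omega) (by omega)
    g g hsh hrefl
  refine ⟨S2, ?_⟩
  intro y x hinb
  obtain ⟨hy0, hyH, hx0, hxW⟩ := hinb
  by_cases hh : pvGet2 hmap y x = h
  · obtain ⟨hm2, hn2⟩ := P2 y x hy0 hyH hx0 hxW
    have hempty : pvSGet g y x = [] :=
      (hcell y x ⟨hy0, hyH, hx0, hxW⟩).2 (by omega)
    constructor
    · intro _
      refine ⟨hn2 (by rw [hempty]; exact List.nodup_nil), ?_⟩
      intro q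
      rw [hm2 q, hempty]
      simp only [List.not_mem_nil, false_or]
      rw [pvReach_succ hmap H W y x q.1 q.2 (by omega)]
      constructor
      · rintro ⟨-, d, hd, c1, c2, c3, c4, c5, hm⟩
        refine ⟨d, hd, c1, c2, c3, c4, c5, ?_⟩
        have hnb := (hcell (y + d.1) (x + d.2) ⟨c1, c2, c3, c4⟩).1 (by omega)
        exact (hnb.2 q).mp hm
      · rintro ⟨d, hd, c1, c2, c3, c4, c5, hr⟩
        refine ⟨hh, d, hd, c1, c2, c3, c4, c5, ?_⟩
        have hnb := (hcell (y + d.1) (x + d.2) ⟨c1, c2, c3, c4⟩).1 (by omega)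
        exact (hnb.2 q).mpr hr
    · intro hcon; omega
  · have hunch : pvSGet ((PySem.List.pyRange 0 H).foldl (fun g y =>
        (PySem.List.pyRange 0 W).foldl (fun g x =>
          pvDirs.foldl (fun g d => pvPull hmap H W h y x g d) g) g) g) y x =
        pvSGet g y x := A2 y x hy0 hx0 hh
    rw [hunch]
    constructor
    · intro ⟨hle, hle9⟩
      exact (hcell y x ⟨hy0, hyH, hx0, hxW⟩).1 ⟨by omega, hle9⟩
    · intro hout
      exact (hcell y x ⟨hy0, hyH, hx0, hxW⟩).2 (by omega)

theorem pvHFold (hmap : List (List Int)) (H W : Int) (hpre : Pre_walk_a hmap H W) :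
    ∀ (n : Nat) (k : Int), -1 ≤ k → k ≤ 8 → (k + 1).toNat = n →
      ∀ g, pvQ hmap H W (k + 1) g →
      pvQ hmap H W 0 ((PySem.List.pyRange k (-1) (-1)).foldl (fun g h =>
        (PySem.List.pyRange 0 H).foldl (fun g y =>
          (PySem.List.pyRange 0 W).foldl (fun g x =>
            pvDirs.foldl (fun g d => pvPull hmap H W h y x g d) g) g) g) g) := by
  intro n
  induction n with
  | zero =>
    intro k hk1 hk8 hkn g hq
    have hk : k = -1 := by omega
    subst hk
    rw [PySem.List.pyRange_neg_one_eq_nil (by omega)]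
    simpa using hq
  | succ n ihn =>
    intro k hk1 hk8 hkn g hq
    have hk0 : 0 ≤ k := by omega
    rw [PySem.List.pyRange_neg_one_cons (by omega : (-1 : Int) < k)]
    simp only [List.foldl_cons]
    have hq1 := pvQStep hmap H W k hpre hk0 hk8 g hq
    have := ihn (k - 1) (by omega) (by omega) (by omega) _ (by
      have hkk : k - 1 + 1 = k := by ring
      rw [hkk]
      exact hq1)
    exact this

-- ---- the seeding double loop ----

theorem pvInit0_get (hmap : List (List Int)) (y x : Int) (hy : 0 ≤ y) (hx : 0 ≤ x) :
    pvSGet (pvInit0 hmap) y x = [] := by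
  rw [pvSGet_eq _ _ _ hy hx]
  unfold pvInit0
  have h1 : ∀ (row : List Int) (m : Nat),
      ((row.map (fun _ => ([] : List (Int × Int)))).getD m []) = [] := by
    intro row m
    rcases Nat.lt_or_ge m row.length with hm | hm
    · simp [List.getD_eq_getElem?_getD, List.getElem?_map, List.getElem?_eq_getElem hm]
    · simp [List.getD_eq_getElem?_getD, List.getElem?_eq_none, List.length_map, hm]
  rcases Nat.lt_or_ge y.toNat hmap.length with hn | hn
  · have h2 : (hmap.map (fun row => row.map (fun _ => ([] : List (Int × Int))))).getD
        y.toNat [] = hmap[y.toNat].map (fun _ => ([] : List (Int × Int))) := by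
      simp [List.getD_eq_getElem?_getD, List.getElem?_map, List.getElem?_eq_getElem hn]
    rw [h2, h1]
  · have h2 : (hmap.map (fun row => row.map (fun _ => ([] : List (Int × Int))))).getD
        y.toNat [] = [] := by
      simp [List.getD_eq_getElem?_getD, List.getElem?_eq_none, List.length_map, hn]
    rw [h2]
    simp [List.getD_eq_getElem?_getD]

theorem pvInit0_sh (hmap : List (List Int)) : pvSh hmap (pvInit0 hmap) := by
  simp [pvSh, pvInit0, Function.comp]

theorem pvMarkRow (hmap : List (List Int)) (H W y : Int)
    (hpre : Pre_walk_a hmap H W) (hy0 : 0 ≤ y) (hyH : y < H) :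
    ∀ (n : Nat) (a : Int), 0 ≤ a → (W - a).toNat = n →
      ∀ g, pvSh hmap g →
      pvSh hmap ((PySem.List.pyRange a W).foldl (fun g x => pvMark9 hmap g y x) g) ∧
      ∀ y' x' : Int, 0 ≤ y' → 0 ≤ x' →
        pvSGet ((PySem.List.pyRange a W).foldl (fun g x => pvMark9 hmap g y x) g) y' x' =
          if y' = y ∧ a ≤ x' ∧ x' < W ∧ pvGet2 hmap y' x' = 9 then
            PySem.Set.add (pvSGet g y' x') (y', x') else pvSGet g y' x' := by
  intro n
  induction n with
  | zero =>
    intro a ha0 han g hsh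
    have hWa : W ≤ a := by omega
    rw [PySem.List.pyRange_one_eq_nil hWa]
    refine ⟨hsh, ?_⟩
    intro y' x' h1 h2
    rw [if_neg (by rintro ⟨-, hh1, hh2, -⟩; omega)]
    rfl
  | succ n ihn =>
    intro a ha0 han g hsh
    have haW : a < W := by omega
    rw [PySem.List.pyRange_one_cons haW]
    simp only [List.foldl_cons]
    have hinb : pvInb H W y a := ⟨hy0, hyH, ha0, haW⟩
    have hyg : y.toNat < g.length := by
      rw [pvSh_len hmap g hsh]; exact (pvRowLen hmap H W y a hpre hinb).1
    have hxg : a.toNat < (g.getD y.toNat []).length := by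
      rw [pvSh_row hmap g hsh y.toNat]; exact (pvRowLen hmap H W y a hpre hinb).2
    have hg1 : ∀ y' x' : Int, 0 ≤ y' → 0 ≤ x' →
        pvSGet (pvMark9 hmap g y a) y' x' =
          if y' = y ∧ x' = a ∧ pvGet2 hmap y' x' = 9 then
            PySem.Set.add (pvSGet g y' x') (y', x') else pvSGet g y' x' := by
      intro y' x' h1 h2
      unfold pvMark9
      by_cases h9 : pvGet2 hmap y a = 9
      · rw [if_pos h9, pvSGet_pvSMod g y a y' x' _ hy0 ha0 h1 h2 hyg hxg]
        by_cases he : y' = y ∧ x' = a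
        · rw [if_pos he, if_pos ⟨he.1, he.2, by rw [he.1, he.2]; exact h9⟩, he.1, he.2]
        · rw [if_neg he, if_neg (by tauto)]
      · rw [if_neg h9]
        rw [if_neg (by rintro ⟨rfl, rfl, hh⟩; exact h9 hh)]
    have hsh1 : pvSh hmap (pvMark9 hmap g y a) := by
      unfold pvMark9
      split
      · exact pvSh_pvSMod hmap g y a _ hsh
      · exact hsh
    obtain ⟨S2, M2⟩ := ihn (a + 1) (by omega) (by omega) _ hsh1
    refine ⟨S2, ?_⟩
    intro y' x' h1 h2
    rw [M2 y' x' h1 h2, hg1 y' x' h1 h2]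
    by_cases hc1 : y' = y ∧ a + 1 ≤ x' ∧ x' < W ∧ pvGet2 hmap y' x' = 9
    · rw [if_pos hc1, if_neg (by rintro ⟨-, rfl, -⟩; omega),
        if_pos ⟨hc1.1, by omega, hc1.2.2.1, hc1.2.2.2⟩]
    · rw [if_neg hc1]
      by_cases hc2 : y' = y ∧ x' = a ∧ pvGet2 hmap y' x' = 9
      · rw [if_pos hc2, if_pos ⟨hc2.1, by omega, by omega, hc2.2.2⟩]
      · rw [if_neg hc2, if_neg (by
          rintro ⟨rfl, hh1, hh2, hh3⟩
          rcases eq_or_lt_of_le hh1 with heq | hlt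
          · exact hc2 ⟨rfl, heq.symm, hh3⟩
          · exact hc1 ⟨rfl, by omega, hh2, hh3⟩)]

theorem pvMarkAll (hmap : List (List Int)) (H W : Int) (hpre : Pre_walk_a hmap H W) :
    ∀ (n : Nat) (a : Int), 0 ≤ a → (H - a).toNat = n →
      ∀ g, pvSh hmap g →
      pvSh hmap ((PySem.List.pyRange a H).foldl (fun g y =>
        (PySem.List.pyRange 0 W).foldl (fun g x => pvMark9 hmap g y x) g) g) ∧
      ∀ y' x' : Int, 0 ≤ y' → 0 ≤ x' →
        pvSGet ((PySem.List.pyRange a H).foldl (fun g y =>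
          (PySem.List.pyRange 0 W).foldl (fun g x => pvMark9 hmap g y x) g) g) y' x' =
          if a ≤ y' ∧ y' < H ∧ 0 ≤ x' ∧ x' < W ∧ pvGet2 hmap y' x' = 9 then
            PySem.Set.add (pvSGet g y' x') (y', x') else pvSGet g y' x' := by
  intro n
  induction n with
  | zero =>
    intro a ha0 han g hsh
    have hHa : H ≤ a := by omega
    rw [PySem.List.pyRange_one_eq_nil hHa]
    refine ⟨hsh, ?_⟩
    intro y' x' h1 h2
    rw [if_neg (by rintro ⟨hh1, hh2, -⟩; omega)]
    rfl
  | succ n ihn =>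
    intro a ha0 han g hsh
    have haH : a < H := by omega
    rw [PySem.List.pyRange_one_cons haH]
    simp only [List.foldl_cons]
    obtain ⟨rS, rM⟩ := pvMarkRow hmap H W a hpre ha0 haH W.toNat 0 (by omega) (by omega) g hsh
    obtain ⟨S2, M2⟩ := ihn (a + 1) (by omega) (by omega) _ rS
    refine ⟨S2, ?_⟩
    intro y' x' h1 h2
    rw [M2 y' x' h1 h2, rM y' x' h1 h2]
    by_cases hc1 : a + 1 ≤ y' ∧ y' < H ∧ 0 ≤ x' ∧ x' < W ∧ pvGet2 hmap y' x' = 9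
    · rw [if_pos hc1, if_neg (by rintro ⟨rfl, -⟩; omega),
        if_pos ⟨by omega, hc1.2.1, hc1.2.2.1, hc1.2.2.2⟩]
    · rw [if_neg hc1]
      by_cases hc2 : y' = a ∧ 0 ≤ x' ∧ x' < W ∧ pvGet2 hmap y' x' = 9
      · rw [if_pos hc2, if_pos ⟨by omega, by omega, hc2.2.1, hc2.2.2.1, hc2.2.2.2⟩]
      · rw [if_neg hc2, if_neg (by
          rintro ⟨hh1, hh2, hh3, hh4, hh5⟩
          rcases eq_or_lt_of_le hh1 with heq | hlt
          · exact hc2 ⟨heq.symm, hh3, hh4, hh5⟩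
          · exact hc1 ⟨by omega, hh2, hh3, hh4, hh5⟩)]

theorem pvInitQ (hmap : List (List Int)) (H W : Int) (hpre : Pre_walk_a hmap H W) :
    pvQ hmap H W 9 ((PySem.List.pyRange 0 H).foldl (fun g y =>
      (PySem.List.pyRange 0 W).foldl (fun g x => pvMark9 hmap g y x) g) (pvInit0 hmap)) := by
  obtain ⟨S2, M2⟩ := pvMarkAll hmap H W hpre H.toNat 0 (by omega) (by omega)
    (pvInit0 hmap) (pvInit0_sh hmap)
  refine ⟨S2, ?_⟩
  intro y x hinb
  obtain ⟨hy0, hyH, hx0, hxW⟩ := hinb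
  have hval := M2 y x hy0 hx0
  rw [pvInit0_get hmap y x hy0 hx0] at hval
  constructor
  · rintro ⟨h9le, hle9⟩
    have h9 : pvGet2 hmap y x = 9 := by omega
    rw [hval, if_pos ⟨hy0, hyH, hx0, hxW, h9⟩]
    have hadd : PySem.Set.add ([] : PySem.Set (Int × Int)) (y, x) = [(y, x)] := rfl
    rw [hadd]
    refine ⟨by simp, ?_⟩
    intro q
    simp only [List.mem_singleton]
    rw [pvReach_nine hmap H W y x q.1 q.2 h9, Prod.ext_iff]
  · intro hout
    have h9 : pvGet2 hmap y x ≠ 9 := by omega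
    rw [hval, if_neg (by rintro ⟨-, -, -, -, hh⟩; exact h9 hh)]

-- ---- final summation ----

theorem pvFoldlCongr {α β : Type} (L : List α) (f g : β → α → β)
    (h : ∀ b, ∀ a ∈ L, f b a = g b a) : ∀ b, L.foldl f b = L.foldl g b := by
  induction L with
  | nil => intro b; rfl
  | cons a L ih =>
    intro b
    simp only [List.foldl_cons, h b a (by simp)]
    exact ih (fun b a ha => h b a (by simp [ha])) _

theorem pvAnsCongr (hmap : List (List Int)) (H W : Int)
    (hpre : Pre_walk_a hmap H W) (g : List (List (List (Int × Int))))
    (hq : pvQ hmap H W 0 g) :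
    (PySem.List.pyRange 0 H).foldl (fun ans y =>
      (PySem.List.pyRange 0 W).foldl (fun ans x =>
        if pvGet2 hmap y x = 0 then ans + ((pvSGet g y x).length : Int) else ans) ans) (0 : Int) =
    walk_a_alt hmap H W := by
  unfold walk_a_alt
  obtain ⟨hsh, hcell⟩ := hq
  apply pvFoldlCongr
  intro ans y hy
  rw [PySem.List.mem_pyRange_one] at hy
  apply pvFoldlCongr
  intro ans' x hx
  rw [PySem.List.mem_pyRange_one] at hx
  by_cases h0 : pvGet2 hmap y x = 0
  · rw [if_pos h0, if_pos h0]
    have hinb : pvInb H W y x := ⟨hy.1, hy.2, hx.1, hx.2⟩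
    obtain ⟨hndA, hmemA⟩ := (hcell y x hinb).1 ⟨le_of_eq h0.symm, by rw [h0]; norm_num⟩
    obtain ⟨hndB, hmemB⟩ := pvNines_correct hmap H W 10 y x hinb (le_of_eq h0.symm)
      (by rw [h0]; norm_num) (by rw [h0]; norm_num)
    have hperm : (pvSGet g y x).Perm (pvNines hmap H W 10 y x) :=
      (List.perm_ext_iff_of_nodup hndA hndB).mpr
        (fun q => (hmemA q).trans (hmemB q).symm)
    rw [hperm.length_eq]
  · rw [if_neg h0, if_neg h0]

-- ===== VERDICT (by name: the statement is the Claim_ definition above) =====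
theorem walk_a_spec : Claim_equal_walk_a := by
  intro hmap H W hdom hpre
  unfold Spec_walk_a walk_a
  have hinit : pvQ hmap H W ((8 : Int) + 1)
      ((PySem.List.pyRange 0 H).foldl (fun g y =>
        (PySem.List.pyRange 0 W).foldl (fun g x => pvMark9 hmap g y x) g) (pvInit0 hmap)) := by
    have := pvInitQ hmap H W hpre
    norm_num
    exact this
  have hq0 := pvHFold hmap H W hpre 9 8 (by norm_num) (by norm_num) (by decide) _ hinit
  exact pvAnsCongr hmap H W hpre _ hq0
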